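-- pv_equiv track=rewrite | github.com/aerospike/aerospike-admin | lib/log_analyzer/log_handler/log_latency.py | _get_max_stat_values
-- ===== SOURCE A (Python) =====
-- def _get_max_stat_values(new_values, old_values):
--     values = []
--
--     newl = len(new_values)
--     oldl = len(old_values)
--
--     for i in range(max(newl, oldl)):
--         if i >= newl:
--             # no item in new_values
--             values.append(old_values[i])
--         elif i >= oldl:
--             # no item in old_values
--             values.append(new_values[i])
--         else:
--             # items available for index i in both list
--             values.append(max(old_values[i], new_values[i]))
--
--     return values
-- ===== SOURCE B (Python) =====
-- def _get_max_stat_values(new_values, old_values):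
--     if len(new_values) >= len(old_values):
--         values, other = list(new_values), old_values
--     else:
--         values, other = list(old_values), new_values
--     for i, x in enumerate(other):
--         if x > values[i]:
--             values[i] = x
--     return values
-- ===== Notes on version B (the rewrite author's own statement) =====
-- stated objective: faster
-- what changed: Instead of A's single index loop over range(max(len,len)) with per-index range-bound branch tests and appends into a fresh list, B copies the longer list wholesale and mutates that copy in place, overwriting an overlap entry only where the shorter list's element is strictly larger.
import Mathlib
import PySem

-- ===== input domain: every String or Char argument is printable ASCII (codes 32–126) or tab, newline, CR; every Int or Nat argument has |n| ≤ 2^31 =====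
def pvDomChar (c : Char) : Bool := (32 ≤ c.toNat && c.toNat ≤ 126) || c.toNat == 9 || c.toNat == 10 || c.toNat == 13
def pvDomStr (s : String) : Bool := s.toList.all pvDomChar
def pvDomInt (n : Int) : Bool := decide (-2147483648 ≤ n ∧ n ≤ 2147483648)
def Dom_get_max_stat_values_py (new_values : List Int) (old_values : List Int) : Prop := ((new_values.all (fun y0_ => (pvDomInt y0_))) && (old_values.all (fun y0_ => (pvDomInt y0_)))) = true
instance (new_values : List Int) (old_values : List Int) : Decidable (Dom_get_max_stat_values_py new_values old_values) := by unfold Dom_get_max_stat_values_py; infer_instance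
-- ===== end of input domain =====

-- B replaces A's index loop (appending per index after range-bound branch tests) by
-- copying the longer list wholesale and mutating it in place: each entry of the
-- overlap is overwritten only where the shorter list's element is strictly larger.
-- (Source B mutates only its own local copy — neither argument is mutated.)

-- ===== PORT A =====
-- index loop over range(max(newl, oldl)); indices are always in range, so pyGetD's
-- default 0 is never used
def get_max_stat_values_py (new_values : List Int) (old_values : List Int) : List Int :=
  let newl : Int := new_values.length
  let oldl : Int := old_values.length
  (PySem.List.pyRange 0 (max newl oldl) 1).foldl
    (fun values i =>
      if i ≥ newl then values ++ [PySem.List.pyGetD old_values i 0]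
      else if i ≥ oldl then values ++ [PySem.List.pyGetD new_values i 0]
      else values ++ [max (PySem.List.pyGetD old_values i 0) (PySem.List.pyGetD new_values i 0)])
    []

-- ===== PORT B =====
-- Source B's loop 'for i, x in enumerate(other): if x > values[i]: values[i] = x';
-- indices from enumerate are always in range of values, so pyGetD's default is unused
-- and pySetD performs exactly the in-place assignment
def pvRaisePrefix (values other : List Int) : List Int :=
  (PySem.List.enumerate other 0).foldl
    (fun vs ix => if ix.2 > PySem.List.pyGetD vs ix.1 0 then PySem.List.pySetD vs ix.1 ix.2 else vs)
    values

def get_max_stat_values_py_alt (new_values : List Int) (old_values : List Int) : List Int :=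
  if new_values.length ≥ old_values.length then pvRaisePrefix new_values old_values
  else pvRaisePrefix old_values new_values

-- ===== PRECONDITION & SPEC =====
def Spec_get_max_stat_values_py (new_values : List Int) (old_values : List Int) (out : List Int) : Prop := out = get_max_stat_values_py_alt new_values old_values
instance (new_values : List Int) (old_values : List Int) (out : List Int) : Decidable (Spec_get_max_stat_values_py new_values old_values out) := by unfold Spec_get_max_stat_values_py; infer_instance

-- ===== CLAIM (what is proved, stated in full; the proofs are below) =====
def Claim_equal_get_max_stat_values_py : Prop := ∀ (new_values : List Int) (old_values : List Int), Dom_get_max_stat_values_py new_values old_values → Spec_get_max_stat_values_py new_values old_values (get_max_stat_values_py new_values old_values)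

-- ===== LEMMAS AND PROOFS =====

-- the per-index value A appends
def pvBody (nv ov : List Int) (i : Int) : Int :=
  if i ≥ (nv.length : Int) then PySem.List.pyGetD ov i 0
  else if i ≥ (ov.length : Int) then PySem.List.pyGetD nv i 0
  else max (PySem.List.pyGetD ov i 0) (PySem.List.pyGetD nv i 0)

lemma get_max_A_eq_map (nv ov : List Int) :
    get_max_stat_values_py nv ov =
      (List.range (max nv.length ov.length)).map (fun (k : Nat) => pvBody nv ov ((k : Nat) : Int)) := by
  unfold get_max_stat_values_py
  have h : ∀ (acc : List Int) (i : Int),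
      (if i ≥ (nv.length : Int) then acc ++ [PySem.List.pyGetD ov i 0]
       else if i ≥ (ov.length : Int) then acc ++ [PySem.List.pyGetD nv i 0]
       else acc ++ [max (PySem.List.pyGetD ov i 0) (PySem.List.pyGetD nv i 0)])
      = acc ++ [pvBody nv ov i] := by
    intro acc i
    unfold pvBody
    split_ifs <;> rfl
  have hN : (max (nv.length : Int) (ov.length : Int) - 0).toNat = max nv.length ov.length := by
    omega
  simp only [h, PySem.List.foldl_append_singleton_eq_map, List.nil_append,
    PySem.List.pyRange_one, zero_add, hN, List.map_map]
  rfl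

-- characterisation of B's in-place loop, for any start offset
lemma pvLoop_spec (other : List Int) (s : Nat) (vs : List Int)
    (h : s + other.length ≤ vs.length) :
    ((PySem.List.enumerate other (s : Int)).foldl
      (fun vs ix => if ix.2 > PySem.List.pyGetD vs ix.1 0 then PySem.List.pySetD vs ix.1 ix.2 else vs)
      vs).length = vs.length ∧
    ∀ k : Nat, k < vs.length →
      ((PySem.List.enumerate other (s : Int)).foldl
        (fun vs ix => if ix.2 > PySem.List.pyGetD vs ix.1 0 then PySem.List.pySetD vs ix.1 ix.2 else vs)
        vs).getD k 0 =
      if s ≤ k ∧ k - s < other.length then max (vs.getD k 0) (other.getD (k - s) 0)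
      else vs.getD k 0 := by
  induction other generalizing s vs with
  | nil =>
      refine ⟨by simp [PySem.List.enumerate_nil], ?_⟩
      intro k hk
      rw [PySem.List.enumerate_nil]
      simp only [List.foldl_nil, List.length_nil]
      rw [if_neg (by omega)]
  | cons x xs ih =>
      rw [PySem.List.enumerate_cons, List.foldl_cons]
      have hs : s < vs.length := by simp at h; omega
      simp only [PySem.List.pyGetD_natCast, PySem.List.pySetD_natCast]
      set vs' := (if x > vs.getD s 0 then vs.set s x else vs) with hvs'
      have hlen' : vs'.length = vs.length := by
        rw [hvs']; split_ifs <;> simp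
      have hget' : ∀ k : Nat, k < vs.length →
          vs'.getD k 0 = if k = s then max (vs.getD k 0) x else vs.getD k 0 := by
        intro k hk
        rw [hvs']
        by_cases hks : k = s
        · subst hks
          rw [if_pos rfl]
          by_cases hcmp : x > vs.getD k 0
          · rw [if_pos hcmp, List.getD_eq_getElem _ _ (by simpa using hk),
                List.getElem_set_self]
            rw [List.getD_eq_getElem vs _ hk] at hcmp ⊢
            omega
          · rw [if_neg hcmp]
            omega
        · rw [if_neg hks]
          by_cases hcmp : x > vs.getD s 0
          · rw [if_pos hcmp, List.getD_eq_getElem _ _ (by simpa using hk),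
                List.getElem_set_ne (by omega), List.getD_eq_getElem vs _ hk]
          · rw [if_neg hcmp]
      have h' : (s + 1) + xs.length ≤ vs'.length := by
        rw [hlen']; simp at h; omega
      have hcast : ((s : Int) + 1) = ((s + 1 : Nat) : Int) := by push_cast; ring
      rw [hcast]
      obtain ⟨ihlen, ihget⟩ := ih (s + 1) vs' h'
      refine ⟨by rw [ihlen, hlen'], ?_⟩
      intro k hk
      rw [ihget k (by omega), hget' k hk]
      by_cases hks : k = s
      · rw [if_neg (show ¬(s + 1 ≤ k ∧ k - (s + 1) < xs.length) by omega),
            if_pos hks,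
            if_pos (show s ≤ k ∧ k - s < (x :: xs).length by
              refine ⟨by omega, ?_⟩; simp; omega)]
        rw [hks, Nat.sub_self, List.getD_cons_zero]
      · by_cases hlt : k < s
        · rw [if_neg (show ¬(s + 1 ≤ k ∧ k - (s + 1) < xs.length) by omega),
              if_neg hks,
              if_neg (show ¬(s ≤ k ∧ k - s < (x :: xs).length) by omega)]
        · have hgt : s + 1 ≤ k := by omega
          by_cases hin : k - (s + 1) < xs.length
          · rw [if_pos ⟨hgt, hin⟩, if_neg hks,
                if_pos (show s ≤ k ∧ k - s < (x :: xs).length by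
                  refine ⟨by omega, ?_⟩; simp; omega)]
            have hcons : (x :: xs).getD (k - s) 0 = xs.getD (k - s - 1) 0 := by
              rw [show k - s = (k - s - 1) + 1 from by omega, List.getD_cons_succ]
              congr 1
            rw [hcons, show k - (s + 1) = k - s - 1 from by omega]
          · rw [if_neg (show ¬(s + 1 ≤ k ∧ k - (s + 1) < xs.length) by omega),
                if_neg hks,
                if_neg (show ¬(s ≤ k ∧ k - s < (x :: xs).length) by simp; omega)]

-- one side: assumes other is the shorter list
lemma pvRaisePrefix_eq (values other : List Int) (h : other.length ≤ values.length) :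
    pvRaisePrefix values other =
      (List.range values.length).map (fun (k : Nat) =>
        if k < other.length then max (values.getD k 0) (other.getD k 0) else values.getD k 0) := by
  have hspec := pvLoop_spec other 0 values (by omega)
  simp only [Nat.cast_zero, Nat.zero_le, true_and, Nat.sub_zero] at hspec
  obtain ⟨hlen, hget⟩ := hspec
  unfold pvRaisePrefix
  apply List.ext_getElem
  · rw [hlen]; simp
  · intro j hj hj'
    simp only [List.getElem_map, List.getElem_range]
    have hg := hget j (by omega)
    rw [List.getD_eq_getElem _ _ hj] at hg
    exact hg

theorem get_max_stat_values_py_key (nv ov : List Int) :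
    get_max_stat_values_py nv ov = get_max_stat_values_py_alt nv ov := by
  rw [get_max_A_eq_map]
  unfold get_max_stat_values_py_alt
  split_ifs with hge
  · rw [pvRaisePrefix_eq nv ov (by omega)]
    rw [show max nv.length ov.length = nv.length from by omega]
    apply List.map_congr_left
    intro k hk
    simp only [List.mem_range] at hk
    unfold pvBody
    rw [if_neg (show ¬((k : Int) ≥ (nv.length : Int)) by omega)]
    by_cases hko : k < ov.length
    · rw [if_neg (show ¬((k : Int) ≥ (ov.length : Int)) by omega)]
      rw [PySem.List.pyGetD_natCast, PySem.List.pyGetD_natCast, if_pos hko]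
      rw [max_comm]
    · rw [if_pos (show (k : Int) ≥ (ov.length : Int) by omega), if_neg hko]
      rw [PySem.List.pyGetD_natCast]
  · rw [pvRaisePrefix_eq ov nv (by omega)]
    rw [show max nv.length ov.length = ov.length from by omega]
    apply List.map_congr_left
    intro k hk
    simp only [List.mem_range] at hk
    unfold pvBody
    by_cases hkn : k < nv.length
    · rw [if_neg (show ¬((k : Int) ≥ (nv.length : Int)) by omega),
          if_neg (show ¬((k : Int) ≥ (ov.length : Int)) by omega),
          if_pos hkn]
      simp only [PySem.List.pyGetD_natCast]
    · rw [if_pos (show (k : Int) ≥ (nv.length : Int) by omega), if_neg hkn]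
      rw [PySem.List.pyGetD_natCast]

-- ===== VERDICT (by name: the statement is the Claim_ definition above) =====
theorem get_max_stat_values_py_spec : Claim_equal_get_max_stat_values_py := by
  intro nv ov _
  exact get_max_stat_values_py_key nv ov
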